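-- pv_equiv track=rewrite | github.com/ilgrisha/CornStructor | backend/app/core/primer/designer.py | has_homopolymer
-- ===== SOURCE A (Python) =====
-- def has_homopolymer(seq: str, max_run: int) -> bool:
--     """Return True if any base repeats more than max_run times consecutively."""
--     if not seq:
--         return False
--     run_char = seq[0]
--     run_len = 1
--     for ch in seq[1:]:
--         if ch == run_char:
--             run_len += 1
--             if run_len > max_run:
--                 return True
--         else:
--             run_char = ch
--             run_len = 1
--     return False
-- ===== SOURCE B (Python) =====
-- def has_homopolymer(seq: str, max_run: int) -> bool:
--     """Return True if any base repeats more than max_run times consecutively.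
--
--     Two stages: mark each adjacent pair of bases as '=' (equal) or '.' (different);
--     a run of length L yields L-1 consecutive '=' marks, so some run exceeds
--     max_run exactly when the mark string contains max_run '=' in a row (which
--     needs max_run <= len(marks), checked first so the probe is never oversized).
--     """
--     marks = "".join("=" if a == b else "." for a, b in zip(seq, seq[1:]))
--     return max_run <= len(marks) and "=" * max_run in marks
-- ===== Notes on version B (the rewrite author's own statement) =====
-- stated objective: alternative
-- what changed: Replaces A's stateful run-counting scan by two stages: map each adjacent pair to an equality mark ('=' or '.') and test whether the mark string contains max_run consecutive '='; Pre_ restricts to the natural threshold domain max_run >= 1, since for max_run <= 0 A's never flagging a length-1 run is an accident of checking only after an increment and B naturally returns True there.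
-- outside the precondition, e.g. on has_homopolymer('ABC', 0): A returns False, B returns True; on has_homopolymer('AA', -3): A returns True, B returns True
import Mathlib
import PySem

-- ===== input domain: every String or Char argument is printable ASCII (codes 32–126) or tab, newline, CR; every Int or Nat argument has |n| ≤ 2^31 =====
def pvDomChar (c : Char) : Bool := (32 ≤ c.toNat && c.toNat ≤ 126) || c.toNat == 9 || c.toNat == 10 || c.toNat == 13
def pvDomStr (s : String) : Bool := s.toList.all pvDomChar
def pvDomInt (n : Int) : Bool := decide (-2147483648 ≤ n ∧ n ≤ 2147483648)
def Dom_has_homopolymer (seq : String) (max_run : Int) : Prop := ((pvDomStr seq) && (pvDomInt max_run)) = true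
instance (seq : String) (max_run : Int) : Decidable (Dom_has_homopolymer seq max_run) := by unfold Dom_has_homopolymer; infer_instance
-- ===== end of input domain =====

-- B replaces A's stateful run-counting scan by marking adjacent pairs and one
-- substring-containment test; equivalence is claimed on max_run ≥ 1.

-- ===== PORT A =====
-- A's for-loop over seq[1:] with state (run_char, run_len) and early return.
def hasHomoLoop (cs : List Char) (run_char : Char) (run_len : Int) (max_run : Int) : Bool :=
  match cs with
  | [] => false
  | ch :: rest =>
    if ch == run_char then
      if run_len + 1 > max_run then true
      else hasHomoLoop rest run_char (run_len + 1) max_run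
    else hasHomoLoop rest ch 1 max_run

def has_homopolymer (seq : String) (max_run : Int) : Bool :=
  match seq.toList with
  | [] => false                       -- if not seq: return False
  | c :: rest => hasHomoLoop rest c 1 max_run

-- ===== PORT B =====
-- marks = "".join("=" if a == b else "." for a, b in zip(seq, seq[1:]))
def pairMarks (cs : List Char) : List Char :=
  List.zipWith (fun a b => if a == b then '=' else '.') cs cs.tail

-- return max_run <= len(marks) and "=" * max_run in marks   ("=" * n is "" for n ≤ 0)
def has_homopolymer_alt (seq : String) (max_run : Int) : Bool :=
  decide (max_run ≤ ((pairMarks seq.toList).length : Int)) &&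
    PySem.Chars.isIn (List.replicate max_run.toNat '=') (pairMarks seq.toList)

-- ===== PRECONDITION & SPEC =====
-- Pre_ restricts to the natural threshold domain max_run ≥ 1: for max_run ≤ 0 A still
-- returns, but its never flagging a length-1 run is an accident of checking only after
-- an increment, and B's containment test naturally returns True on every string there.
def Pre_has_homopolymer (seq : String) (max_run : Int) : Prop := 1 ≤ max_run
instance (seq : String) (max_run : Int) : Decidable (Pre_has_homopolymer seq max_run) := by unfold Pre_has_homopolymer; infer_instance

def pvWitness_has_homopolymer : String × Int := ("ACGTT", 2)

def Spec_has_homopolymer (seq : String) (max_run : Int) (out : Bool) : Prop := out = has_homopolymer_alt seq max_run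
instance (seq : String) (max_run : Int) (out : Bool) : Decidable (Spec_has_homopolymer seq max_run out) := by unfold Spec_has_homopolymer; infer_instance

-- ===== CLAIM (what is proved, stated in full; the proofs are below) =====
def Claim_equal_has_homopolymer : Prop := ∀ (seq : String) (max_run : Int), Dom_has_homopolymer seq max_run → Pre_has_homopolymer seq max_run → Spec_has_homopolymer seq max_run (has_homopolymer seq max_run)

-- ===== LEMMAS AND PROOFS =====

-- Proof-only helper: A's scan, rephrased as stripping one maximal run at a time.
def runLoop (cs : List Char) (threshold : Int) : Bool :=
  match cs with
  | [] => false
  | c :: rest =>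
    let run := ((c :: rest).takeWhile (· == c)).length
    if (run : Int) > threshold then true
    else runLoop ((c :: rest).drop run) threshold
termination_by cs.length
decreasing_by
  have : 0 < run := by simp [run]
  simp only [List.length_drop, List.length_cons]
  omega

theorem runLoop_nil (t : Int) : runLoop [] t = false := by rw [runLoop]

theorem runLoop_cons (c : Char) (rest : List Char) (t : Int) :
    runLoop (c :: rest) t =
      (if ((((c :: rest).takeWhile (· == c)).length : ℕ) : Int) > t then true
       else runLoop ((c :: rest).drop ((c :: rest).takeWhile (· == c)).length) t) := by
  rw [runLoop]

theorem drop_run_eq_dropWhile (c : Char) (rest : List Char) :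
    (c :: rest).drop (((c :: rest).takeWhile (· == c)).length) = rest.dropWhile (· == c) := by
  simp only [List.takeWhile_cons, beq_self_eq_true, if_true, List.length_cons,
    List.drop_succ_cons]
  conv_lhs => rw [← List.takeWhile_append_dropWhile (p := (· == c)) (l := rest)]
  rw [List.drop_append_of_le_length (by simp)]
  simp

theorem runLoop_cons_run (c : Char) (rest : List Char) (m : Int) :
    ((decide (1 ≤ (rest.takeWhile (· == c)).length) &&
      decide (1 + ((rest.takeWhile (· == c)).length : Int) > m)) ||
      runLoop (rest.dropWhile (· == c)) (max m 1)) = runLoop (c :: rest) (max m 1) := by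
  rw [runLoop_cons, drop_run_eq_dropWhile]
  simp only [List.takeWhile_cons, beq_self_eq_true, if_true, List.length_cons]
  split_ifs with hgt
  · have h1 : decide (1 ≤ (rest.takeWhile (· == c)).length) = true := by
      simp only [decide_eq_true_eq]; push_cast at hgt; omega
    have h2 : decide (1 + ((rest.takeWhile (· == c)).length : Int) > m) = true := by
      simp only [decide_eq_true_eq]; push_cast at hgt; omega
    rw [h1, h2]; rfl
  · cases hX : (decide (1 ≤ (rest.takeWhile (· == c)).length) &&
        decide (1 + ((rest.takeWhile (· == c)).length : Int) > m)) with
    | false => rw [Bool.false_or]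
    | true =>
      exfalso
      rw [Bool.and_eq_true] at hX
      simp only [decide_eq_true_eq] at hX
      push_cast at hgt
      omega

-- A's inner loop characterised against runLoop.
theorem hasHomoLoop_eq (cs : List Char) (rc : Char) (rl m : Int) :
    hasHomoLoop cs rc rl m =
      ((decide (1 ≤ (cs.takeWhile (· == rc)).length) &&
        decide (rl + ((cs.takeWhile (· == rc)).length : Int) > m)) ||
        runLoop (cs.dropWhile (· == rc)) (max m 1)) := by
  induction cs generalizing rc rl with
  | nil => simp [hasHomoLoop, runLoop_nil]
  | cons c rest ih =>
    by_cases hc : c = rc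
    · subst hc
      simp only [hasHomoLoop, beq_self_eq_true, if_true, List.takeWhile_cons,
        List.dropWhile_cons, List.length_cons]
      by_cases hgt : rl + 1 > m
      · rw [if_pos hgt]
        have hY : (decide (1 ≤ (rest.takeWhile (· == c)).length + 1) &&
            decide (rl + (((rest.takeWhile (· == c)).length + 1 : ℕ) : Int) > m)) = true := by
          rw [Bool.and_eq_true]
          simp only [decide_eq_true_eq]
          refine ⟨by omega, by push_cast; omega⟩
        rw [hY, Bool.true_or]
      · rw [if_neg hgt, ih]
        rw [Bool.eq_iff_iff, Bool.or_eq_true, Bool.or_eq_true, Bool.and_eq_true,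
          Bool.and_eq_true]
        simp only [decide_eq_true_eq]
        constructor
        · rintro (⟨h1, h2⟩ | hr)
          · exact Or.inl ⟨by omega, by push_cast at h2 ⊢; omega⟩
          · exact Or.inr hr
        · rintro (⟨h1, h2⟩ | hr)
          · push_cast at h2
            exact Or.inl ⟨by omega, by omega⟩
          · exact Or.inr hr
    · have hbeq : (c == rc) = false := by simp [hc]
      simp only [hasHomoLoop, hbeq, Bool.false_eq_true, if_false, List.takeWhile_cons,
        List.dropWhile_cons, List.length_nil]
      rw [ih]
      have h0 : decide (1 ≤ (0 : ℕ)) = false := by decide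
      rw [h0, Bool.false_and, Bool.false_or]
      exact runLoop_cons_run c rest m

theorem has_homopolymer_eq_runLoop (seq : String) (max_run : Int) :
    has_homopolymer seq max_run = runLoop seq.toList (max max_run 1) := by
  unfold has_homopolymer
  cases hcs : seq.toList with
  | nil => exact (runLoop_nil _).symm
  | cons c rest =>
    show hasHomoLoop rest c 1 max_run = runLoop (c :: rest) (max max_run 1)
    rw [hasHomoLoop_eq]
    exact runLoop_cons_run c rest max_run

-- Structure of the mark list over the leading maximal run.
theorem pairMarks_decomp (c : Char) (rest : List Char) :
    pairMarks (c :: rest) =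
      List.replicate ((rest.takeWhile (· == c)).length) '=' ++
        (match rest.dropWhile (· == c) with
         | [] => []
         | suf => '.' :: pairMarks suf) := by
  induction rest generalizing c with
  | nil => simp [pairMarks]
  | cons b t ih =>
    by_cases hb : b = c
    · subst hb
      have : pairMarks (b :: b :: t) = '=' :: pairMarks (b :: t) := by
        simp [pairMarks]
      rw [this, ih b]
      simp [List.replicate_succ]
    · have hbeq : (b == c) = false := by simp [hb]
      have hbeq' : (c == b) = false := by
        simp only [beq_eq_false_iff_ne, ne_eq]
        exact fun h => hb h.symm
      have : pairMarks (c :: b :: t) = '.' :: pairMarks (b :: t) := by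
        simp [pairMarks]
        exact fun h => hb h.symm
      rw [this]
      simp only [List.takeWhile_cons, List.dropWhile_cons, hbeq, Bool.false_eq_true,
        if_false, List.length_nil, List.replicate_zero, List.nil_append]

theorem rep_prefix_iff (k j : Nat) (xs : List Char) :
    (List.replicate k '=' <+: List.replicate j '=' ++ '.' :: xs) ↔ k ≤ j := by
  induction k generalizing j with
  | zero => simp
  | succ k ih =>
    cases j with
    | zero =>
      simp only [List.replicate_succ, List.replicate_zero, List.nil_append,
        List.cons_prefix_cons]
      constructor
      · rintro ⟨h, -⟩; exact absurd h (by decide)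
      · intro h; exact absurd h (by omega)
    | succ j =>
      simp only [List.replicate_succ, List.cons_append, List.cons_prefix_cons]
      rw [ih]
      constructor
      · rintro ⟨-, h⟩; omega
      · intro h; exact ⟨by trivial, by omega⟩

theorem rep_infix_dot (k : Nat) (hk : 1 ≤ k) (xs : List Char) :
    (List.replicate k '=' <:+: '.' :: xs) ↔ List.replicate k '=' <:+: xs := by
  constructor
  · intro h
    rcases (List.infix_cons_iff).1 h with hp | hi
    · exfalso
      cases k with
      | zero => omega
      | succ k =>
        rw [List.replicate_succ, List.cons_prefix_cons] at hp
        exact absurd hp.1 (by decide)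
    · exact hi
  · intro h
    exact List.infix_cons h

theorem rep_infix_append (k : Nat) (hk : 1 ≤ k) (r : Nat) (xs : List Char) :
    (List.replicate k '=' <:+: List.replicate r '=' ++ '.' :: xs) ↔
      k ≤ r ∨ List.replicate k '=' <:+: xs := by
  induction r with
  | zero =>
    rw [List.replicate_zero, List.nil_append, rep_infix_dot k hk]
    constructor
    · exact Or.inr
    · rintro (h | h)
      · exact absurd h (by omega)
      · exact h
  | succ r ih =>
    rw [List.replicate_succ, List.cons_append, List.infix_cons_iff, ih]
    rw [show ('=' :: (List.replicate r '=' ++ '.' :: xs)) =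
        List.replicate (r+1) '=' ++ '.' :: xs by simp [List.replicate_succ]]
    rw [rep_prefix_iff]
    constructor
    · rintro (h | h | h)
      · left; exact h
      · left; omega
      · right; exact h
    · rintro (h | h)
      · by_cases hkr : k ≤ r
        · right; left; exact hkr
        · left; omega
      · right; right; exact h

theorem rep_infix_rep (k r : Nat) :
    (List.replicate k '=' <:+: List.replicate r '=') ↔ k ≤ r := by
  constructor
  · intro h
    have := h.sublist.length_le
    simpa using this
  · intro h
    have : List.replicate r '=' = List.replicate k '=' ++ List.replicate (r - k) '=' := by
      rw [← List.replicate_add]; congr 1; omega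
    exact (List.IsPrefix.isInfix ⟨List.replicate (r - k) '=', this.symm⟩)

-- runLoop against B's containment test, for threshold m ≥ 1.
theorem runLoop_eq_isIn (m : Int) (hm : 1 ≤ m) (cs : List Char) :
    runLoop cs m = PySem.Chars.isIn (List.replicate m.toNat '=') (pairMarks cs) := by
  have hk : 1 ≤ m.toNat := by omega
  have hmk : ((m.toNat : Nat) : Int) = m := Int.toNat_of_nonneg (by omega)
  induction hn : cs.length using Nat.strong_induction_on generalizing cs with
  | _ n ih =>
  cases cs with
  | nil =>
    have hpm : pairMarks [] = [] := rfl
    rw [runLoop_nil, hpm]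
    rw [Bool.eq_iff_iff]
    simp only [Bool.false_eq_true, false_iff, PySem.Chars.isIn_iff_infix]
    intro h
    have h2 : m.toNat ≤ 0 := by simpa using h.sublist.length_le
    omega
  | cons c rest =>
    rw [runLoop_cons, drop_run_eq_dropWhile, pairMarks_decomp]
    set r := (rest.takeWhile (· == c)).length with hr
    have hrun : ((c :: rest).takeWhile (· == c)).length = r + 1 := by
      simp [hr]
    rw [hrun]
    cases hsuf : rest.dropWhile (· == c) with
    | nil =>
      simp only [List.append_nil]
      rw [Bool.eq_iff_iff]
      rw [PySem.Chars.isIn_iff_infix, rep_infix_rep]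
      split_ifs with hgt
      · simp only [true_iff]
        push_cast at hgt
        omega
      · rw [runLoop_nil]
        simp only [Bool.false_eq_true, false_iff]
        push_cast at hgt
        omega
    | cons d t =>
      have hlen : (d :: t).length < n := by
        have h1 := List.length_dropWhile_le (p := (· == c)) rest
        rw [hsuf] at h1
        have h2 : (c :: rest).length = n := hn
        simp only [List.length_cons] at h1 h2 ⊢
        omega
      rw [Bool.eq_iff_iff]
      rw [PySem.Chars.isIn_iff_infix, rep_infix_append m.toNat hk]
      split_ifs with hgt
      · simp only [true_iff]
        push_cast at hgt
        left; omega
      · rw [ih _ hlen _ rfl, PySem.Chars.isIn_iff_infix]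
        push_cast at hgt
        constructor
        · intro h; right; exact h
        · rintro (h | h)
          · omega
          · exact h

-- ===== VERDICT (by name: the statement is the Claim_ definition above) =====
theorem has_homopolymer_spec : Claim_equal_has_homopolymer := by
  intro seq max_run _ hpre
  unfold Spec_has_homopolymer has_homopolymer_alt
  rw [has_homopolymer_eq_runLoop]
  have hmax : max max_run 1 = max_run := by
    unfold Pre_has_homopolymer at hpre; omega
  rw [hmax, runLoop_eq_isIn max_run hpre seq.toList]
  cases hIn : PySem.Chars.isIn (List.replicate max_run.toNat '=') (pairMarks seq.toList) with
  | false => rw [Bool.and_false]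
  | true =>
    have hinf := (PySem.Chars.isIn_iff_infix _ _).1 hIn
    have hlen := hinf.sublist.length_le
    simp only [List.length_replicate] at hlen
    have hd : decide (max_run ≤ ((pairMarks seq.toList).length : Int)) = true := by
      simp only [decide_eq_true_eq]
      omega
    rw [hd, Bool.true_and]
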